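-- pv_equiv track=rewrite | github.com/olgaobiols/sbc_recomanador_menus | genera_instancies.py | _normalize_estacions_list
-- ===== SOURCE A (Python) =====
-- import unicodedata
--
-- ESTACIONS_CANON = ("primavera", "estiu", "tardor", "hivern")
--
-- ALIASES_ESTACIONS = {
--     "spring": "primavera", "summer": "estiu", "autumn": "tardor", "fall": "tardor", "winter": "hivern",
--     "primavera": "primavera", "estiu": "estiu", "tardor": "tardor", "hivern": "hivern",
--     "verano": "estiu", "otoño": "tardor", "invierno": "hivern",
-- }
--
-- def _strip_accents(value: str) -> str:
--     normalized = unicodedata.normalize("NFKD", value)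
--     return "".join(ch for ch in normalized if not unicodedata.combining(ch))
--
-- def _normalize_estacions_list(vals: list[str]) -> list[str]:
--     """Normalitza estacions (alias → canònic), elimina duplicats i ordena primavera→hivern."""
--     out = []
--     seen = set()
--     for v in vals:
--         k = _strip_accents(str(v)).strip().lower()
--         canon = ALIASES_ESTACIONS.get(k, k)
--         if canon in ESTACIONS_CANON and canon not in seen:
--             seen.add(canon); out.append(canon)
--     # ordena segons l'ordre canònic
--     order = {e:i for i,e in enumerate(ESTACIONS_CANON)}
--     out.sort(key=lambda x: order.get(x, 99))
--     return out
-- ===== SOURCE B (Python) =====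
-- import unicodedata
--
-- ESTACIONS_CANON = ("primavera", "estiu", "tardor", "hivern")
--
-- ALIASES_ESTACIONS = {
--     "spring": "primavera", "summer": "estiu", "autumn": "tardor", "fall": "tardor", "winter": "hivern",
--     "primavera": "primavera", "estiu": "estiu", "tardor": "tardor", "hivern": "hivern",
--     "verano": "estiu", "otoño": "tardor", "invierno": "hivern",
-- }
--
-- def _strip_accents(value: str) -> str:
--     normalized = unicodedata.normalize("NFKD", value)
--     return "".join(ch for ch in normalized if not unicodedata.combining(ch))
--
-- def _normalize_estacions_list(vals: list[str]) -> list[str]: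
--     """One pass collecting the seasons present, then a fixed canonical-order scan."""
--     present = set()
--     for v in vals:
--         k = _strip_accents(str(v)).strip().lower()
--         c = ALIASES_ESTACIONS.get(k, k)
--         if c in ESTACIONS_CANON:
--             present.add(c)
--     return [e for e in ESTACIONS_CANON if e in present]
-- ===== Notes on version B (the rewrite author's own statement) =====
-- stated objective: simpler
-- what changed: Replaces the seen-list/input-order accumulation plus explicit sort by a membership set collected in one pass and a fixed scan over the four canonical seasons in order, so the sort disappears.
import Mathlib
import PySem

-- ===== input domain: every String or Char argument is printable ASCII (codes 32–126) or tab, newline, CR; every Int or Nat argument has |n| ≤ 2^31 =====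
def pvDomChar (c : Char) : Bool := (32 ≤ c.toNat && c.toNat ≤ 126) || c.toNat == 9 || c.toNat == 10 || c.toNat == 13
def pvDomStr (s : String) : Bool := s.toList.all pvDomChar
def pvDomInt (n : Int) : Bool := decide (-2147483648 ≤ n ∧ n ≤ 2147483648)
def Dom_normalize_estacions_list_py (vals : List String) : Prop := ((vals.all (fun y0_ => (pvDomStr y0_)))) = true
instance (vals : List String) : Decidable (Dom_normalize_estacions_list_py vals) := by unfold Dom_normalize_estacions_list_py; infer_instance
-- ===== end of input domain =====

-- B replaces A's seen-list + input-order accumulation + explicit sort by a one-pass membership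
-- set and a fixed scan over the four canonical seasons; simpler, same results.

-- ===== PORT A =====
def pvEstacionsCanon : List String := ["primavera", "estiu", "tardor", "hivern"]

def pvAliasesEstacions : PySem.Dict String String := PySem.Dict.ofList
  [("spring", "primavera"), ("summer", "estiu"), ("autumn", "tardor"), ("fall", "tardor"),
   ("winter", "hivern"), ("primavera", "primavera"), ("estiu", "estiu"), ("tardor", "tardor"),
   ("hivern", "hivern"), ("verano", "estiu"), ("otoño", "tardor"), ("invierno", "hivern")]

-- _strip_accents: on the printable-ASCII input domain NFKD is the identity and no character is
-- combining, so the helper is the identity there; exact on Dom_.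
def pv_strip_accents (value : String) : String := value

def pvOrderEstacions : PySem.Dict String Nat :=
  PySem.Dict.ofList [("primavera", 0), ("estiu", 1), ("tardor", 2), ("hivern", 3)]

def normalize_estacions_list_py (vals : List String) : List String :=
  let st := vals.foldl (fun (st : List String × PySem.Set String) v =>
    let k := PySem.Str.lower (PySem.Str.strip (pv_strip_accents v))
    let canon := pvAliasesEstacions.getD k k
    if pvEstacionsCanon.contains canon && !(PySem.Set.contains st.2 canon) then
      (st.1 ++ [canon], PySem.Set.add st.2 canon)
    else st) ([], PySem.Set.empty)
  PySem.List.sorted st.1 (fun x => pvOrderEstacions.getD x 99) false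

-- ===== PORT B =====
-- Source B's own copy of _strip_accents (identity on the ASCII domain, as above)
def pv_strip_accents_alt (value : String) : String := value

def normalize_estacions_list_py_alt (vals : List String) : List String :=
  let present := vals.foldl (fun (s : PySem.Set String) v =>
    let k := PySem.Str.lower (PySem.Str.strip (pv_strip_accents_alt v))
    let c := pvAliasesEstacions.getD k k
    if pvEstacionsCanon.contains c then PySem.Set.add s c else s) PySem.Set.empty
  pvEstacionsCanon.filter (fun e => PySem.Set.contains present e)

-- ===== PRECONDITION & SPEC =====
def Spec_normalize_estacions_list_py (vals : List String) (out : List String) : Prop := out = normalize_estacions_list_py_alt vals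
instance (vals : List String) (out : List String) : Decidable (Spec_normalize_estacions_list_py vals out) := by unfold Spec_normalize_estacions_list_py; infer_instance

-- ===== CLAIM (what is proved, stated in full; the proofs are below) =====
def Claim_equal_normalize_estacions_list_py : Prop := ∀ (vals : List String), Dom_normalize_estacions_list_py vals → Spec_normalize_estacions_list_py vals (normalize_estacions_list_py vals)

-- ===== LEMMAS AND PROOFS =====

-- B's loop body, named for the proofs (definitionally equal to the lambda in the port)
def pvCanonOf (v : String) : String :=
  pvAliasesEstacions.getD (PySem.Str.lower (PySem.Str.strip (pv_strip_accents_alt v)))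
    (PySem.Str.lower (PySem.Str.strip (pv_strip_accents_alt v)))

def pvStepB (s : PySem.Set String) (v : String) : PySem.Set String :=
  if pvEstacionsCanon.contains (pvCanonOf v) then PySem.Set.add s (pvCanonOf v) else s

-- A's paired accumulator stays the diagonal of B's set: one step
lemma pvStepA_diag (s : PySem.Set String) (v : String) :
    (let k := PySem.Str.lower (PySem.Str.strip (pv_strip_accents v))
     let canon := pvAliasesEstacions.getD k k
     if pvEstacionsCanon.contains canon && !(PySem.Set.contains s canon) then
       (s ++ [canon], PySem.Set.add s canon)
     else ((s : List String), s)) = (pvStepB s v, pvStepB s v) := by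
  simp only [pvStepB, pvCanonOf, pv_strip_accents, pv_strip_accents_alt, PySem.Set.add]
  by_cases h1 : pvAliasesEstacions.getD (PySem.Str.lower (PySem.Str.strip v))
      (PySem.Str.lower (PySem.Str.strip v)) ∈ pvEstacionsCanon
  · by_cases h2 : pvAliasesEstacions.getD (PySem.Str.lower (PySem.Str.strip v))
        (PySem.Str.lower (PySem.Str.strip v)) ∈ s <;> simp [h1, h2]
  · simp [h1]

lemma pv_loop_diag (vals : List String) (s : PySem.Set String) :
    vals.foldl (fun (st : List String × PySem.Set String) v =>
      let k := PySem.Str.lower (PySem.Str.strip (pv_strip_accents v))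
      let canon := pvAliasesEstacions.getD k k
      if pvEstacionsCanon.contains canon && !(PySem.Set.contains st.2 canon) then
        (st.1 ++ [canon], PySem.Set.add st.2 canon)
      else st) ((s : List String), s)
    = (vals.foldl pvStepB s, vals.foldl pvStepB s) := by
  induction vals generalizing s with
  | nil => rfl
  | cons v t ih =>
    simp only [List.foldl_cons]
    rw [show (let k := PySem.Str.lower (PySem.Str.strip (pv_strip_accents v))
      let canon := pvAliasesEstacions.getD k k
      if pvEstacionsCanon.contains canon && !(PySem.Set.contains (((s : List String), s) : List String × PySem.Set String).2 canon) then
        ((((s : List String), s) : List String × PySem.Set String).1 ++ [canon], PySem.Set.add (((s : List String), s) : List String × PySem.Set String).2 canon)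
      else (((s : List String), s) : List String × PySem.Set String)) = (pvStepB s v, pvStepB s v) from pvStepA_diag s v]
    exact ih (pvStepB s v)

-- invariants of B's loop: the collected set is Nodup and its members lie in the canonical list
lemma pvStepB_inv (s : PySem.Set String) (v : String) (hnd : s.Nodup)
    (hsub : ∀ x ∈ s, x ∈ pvEstacionsCanon) :
    (pvStepB s v).Nodup ∧ ∀ x ∈ pvStepB s v, x ∈ pvEstacionsCanon := by
  unfold pvStepB
  generalize pvCanonOf v = c
  by_cases hm : c ∈ pvEstacionsCanon
  · rw [if_pos (show pvEstacionsCanon.contains c = true by simpa using hm)]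
    refine ⟨PySem.Set.nodup_add s c hnd, ?_⟩
    intro x hx
    by_cases hcs : c ∈ s
    · have hadd : PySem.Set.add s c = s := by simp [PySem.Set.add, hcs]
      rw [hadd] at hx; exact hsub x hx
    · have hadd : PySem.Set.add s c = s ++ [c] := by simp [PySem.Set.add, hcs]
      rw [hadd] at hx
      rcases List.mem_append.mp hx with h | h
      · exact hsub x h
      · rw [List.mem_singleton] at h; subst h; exact hm
  · rw [if_neg (show ¬ pvEstacionsCanon.contains c = true by simpa using hm)]
    exact ⟨hnd, hsub⟩

lemma pv_loop_inv (vals : List String) (s : PySem.Set String)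
    (hnd : s.Nodup) (hsub : ∀ x ∈ s, x ∈ pvEstacionsCanon) :
    (vals.foldl pvStepB s).Nodup ∧ ∀ x ∈ vals.foldl pvStepB s, x ∈ pvEstacionsCanon := by
  induction vals generalizing s with
  | nil => exact ⟨hnd, hsub⟩
  | cons v t ih =>
    simp only [List.foldl_cons]
    exact ih (pvStepB s v) (pvStepB_inv s v hnd hsub).1 (pvStepB_inv s v hnd hsub).2

-- sorting a Nodup sublist-of-canon by canonical index is the canonical-order filter
lemma pv_sorted_eq_filter (p : List String) (hnd : p.Nodup)
    (hsub : ∀ x ∈ p, x ∈ pvEstacionsCanon) :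
    PySem.List.sorted p (fun x => pvOrderEstacions.getD x 99) false
      = pvEstacionsCanon.filter (fun e => PySem.Set.contains p e) := by
  apply PySem.List.sorted_eq_of_perm_of_pairwise_lt
  · rw [List.perm_ext_iff_of_nodup (List.Nodup.filter _ (by decide)) hnd]
    intro a
    simp only [List.mem_filter, PySem.Set.contains_eq_listContains, List.contains_iff_mem]
    exact ⟨fun h => h.2, fun h => ⟨hsub a h, h⟩⟩
  · exact List.Pairwise.filter _ (by decide)

-- ===== VERDICT (by name: the statement is the Claim_ definition above) =====
theorem normalize_estacions_list_py_spec : Claim_equal_normalize_estacions_list_py := by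
  intro vals _
  unfold Spec_normalize_estacions_list_py normalize_estacions_list_py normalize_estacions_list_py_alt
  have hd := pv_loop_diag vals PySem.Set.empty
  have hinv := pv_loop_inv vals PySem.Set.empty (by decide) (by intro x hx; cases hx)
  simp only [PySem.Set.empty] at hd hinv ⊢
  rw [show (([] : List String), ([] : PySem.Set String)) = ((([] : PySem.Set String) : List String), ([] : PySem.Set String)) from rfl]
  rw [hd]
  exact pv_sorted_eq_filter _ hinv.1 hinv.2
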